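-- pv_equiv track=rewrite | github.com/paust-team/pko-t5 | pkot5/xl/training_tpu.py | get_device_map
-- ===== SOURCE A (Python) =====
-- def get_device_map(num_layers: int, num_groups: int):
--     range_start = 0
--     range_end = num_layers - 1
--
--     group_size = (range_end - range_start + 1) // num_groups
--     reserved = (range_end - range_start + 1) % num_groups
--     groups = []
--
--     begin = 0
--     while begin < range_end + 1:
--         end = begin + group_size
--         if reserved > 0:
--             end += 1
--         end = min(end, range_end + 1)
--
--         groups.append(list(range(begin, end)))
--         begin = end
--         reserved -= 1
--
--     groups = {i: g for i, g in enumerate(groups)}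
--     return groups
-- ===== SOURCE B (Python) =====
-- def get_device_map(num_layers: int, num_groups: int):
--     group_size, reserved = divmod(num_layers, num_groups)
--     groups = {}
--     for i in range(num_groups):
--         length = group_size + (1 if i < reserved else 0)
--         if length <= 0:
--             break
--         start = i * group_size + min(i, reserved)
--         groups[i] = list(range(start, start + length))
--     return groups
-- ===== Notes on version B (the rewrite author's own statement) =====
-- stated objective: alternative
-- what changed: Replaces A's sequential while-loop threading a running begin cursor (with clamping and a decremented reserved counter) by a per-group closed-form computation: each group's start and length are computed directly from i, num_layers//num_groups and num_layers%num_groups, stopping when a group would be empty.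
-- outside the precondition, e.g. on get_device_map(5, 0): A raises ZeroDivisionError, B raises ZeroDivisionError; on get_device_map(5, -2): A does not finish within the time limit, B returns {}
import Mathlib
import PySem

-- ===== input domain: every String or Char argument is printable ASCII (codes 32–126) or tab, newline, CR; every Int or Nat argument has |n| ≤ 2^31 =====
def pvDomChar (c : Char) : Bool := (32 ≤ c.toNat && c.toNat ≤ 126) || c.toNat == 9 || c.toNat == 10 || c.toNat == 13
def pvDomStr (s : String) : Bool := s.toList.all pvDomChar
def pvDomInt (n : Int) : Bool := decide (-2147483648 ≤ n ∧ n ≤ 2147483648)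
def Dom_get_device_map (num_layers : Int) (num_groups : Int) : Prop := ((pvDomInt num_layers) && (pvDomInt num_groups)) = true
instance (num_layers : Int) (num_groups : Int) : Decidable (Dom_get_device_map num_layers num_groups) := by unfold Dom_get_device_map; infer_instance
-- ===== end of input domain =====

-- B replaces A's sequential begin-cursor loop by a closed-form start/length per group
-- (alternative decomposition; same linear cost).


-- ===== PORT A =====
-- A's while loop; fuel only makes the recursion total — on Pre_ it never runs out
-- (the loop performs at most num_layers iterations there).
def get_device_map_loop (range_end group_size : Int) : Nat → Int → Int → List (List Int)
  | 0, _, _ => []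
  | fuel + 1, begin_, reserved =>
    if begin_ < range_end + 1 then
      let e1 := begin_ + group_size
      let e2 := if reserved > 0 then e1 + 1 else e1
      let e3 := min e2 (range_end + 1)
      PySem.List.pyRange begin_ e3 1 ::
        get_device_map_loop range_end group_size fuel e3 (reserved - 1)
    else []

def get_device_map (num_layers : Int) (num_groups : Int) : List (Int × List Int) :=
  let range_start : Int := 0
  let range_end : Int := num_layers - 1
  let group_size := PySem.Int.floordiv (range_end - range_start + 1) num_groups
  let reserved := PySem.Int.mod (range_end - range_start + 1) num_groups
  let groups := get_device_map_loop range_end group_size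
      (num_layers.toNat + num_groups.toNat + 1) 0 reserved
  -- {i: g for i, g in enumerate(groups)}: fresh increasing keys, so the dict is this assoc list
  PySem.List.enumerate groups

-- ===== PORT B =====
def get_device_map_alt_go (group_size reserved : Int) : List Int → List (Int × List Int)
  | [] => []
  | i :: rest =>
    let length := group_size + (if i < reserved then 1 else 0)
    if length ≤ 0 then []   -- break
    else
      let start := i * group_size + min i reserved
      (i, PySem.List.pyRange start (start + length) 1) ::
        get_device_map_alt_go group_size reserved rest

def get_device_map_alt (num_layers : Int) (num_groups : Int) : List (Int × List Int) :=
  let group_size := PySem.Int.floordiv num_layers num_groups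
  let reserved := PySem.Int.mod num_layers num_groups
  get_device_map_alt_go group_size reserved (PySem.List.pyRange 0 num_groups 1)

-- ===== PRECONDITION & SPEC =====
-- Pre_ excludes num_groups = 0, where A raises ZeroDivisionError, and
-- num_groups < 0 with num_layers > 0, where A's while loop never terminates.
def Pre_get_device_map (num_layers : Int) (num_groups : Int) : Prop :=
  0 < num_groups ∨ (num_groups < 0 ∧ num_layers ≤ 0)
instance (num_layers : Int) (num_groups : Int) : Decidable (Pre_get_device_map num_layers num_groups) := by unfold Pre_get_device_map; infer_instance
def pvWitness_get_device_map : Int × Int := (24, 5)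

def Spec_get_device_map (num_layers : Int) (num_groups : Int) (out : List (Int × List Int)) : Prop := out = get_device_map_alt num_layers num_groups
instance (num_layers : Int) (num_groups : Int) (out : List (Int × List Int)) : Decidable (Spec_get_device_map num_layers num_groups out) := by unfold Spec_get_device_map; infer_instance

-- ===== CLAIM (what is proved, stated in full; the proofs are below) =====
def Claim_equal_get_device_map : Prop := ∀ (num_layers : Int) (num_groups : Int), Dom_get_device_map num_layers num_groups → Pre_get_device_map num_layers num_groups → Spec_get_device_map num_layers num_groups (get_device_map num_layers num_groups)

-- ===== LEMMAS AND PROOFS =====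

-- Loop invariant: after k iterations A's cursor sits at k*q + min k r with
-- reserved = r - k, and what remains (enumerated from k) is exactly B's tail.
theorem get_device_map_invariant (n g q r : Int) (hq : 0 ≤ q)
    (hrg : r < g) (hn : q * g + r = n) :
    ∀ (fuel : Nat) (k : Int), 0 ≤ k → g ≤ k + fuel →
      PySem.List.enumerate
        (get_device_map_loop (n - 1) q fuel (k * q + min k r) (r - k)) k
      = get_device_map_alt_go q r (PySem.List.pyRange k g 1) := by
  intro fuel
  induction fuel with
  | zero =>
    intro k hk hfg
    rw [PySem.List.pyRange_one_eq_nil (by omega)]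
    simp [get_device_map_loop, get_device_map_alt_go]
  | succ fuel ih =>
    intro k hk hfg
    have hne : n - 1 + 1 = n := by ring
    by_cases hkg : k < g
    · -- bound: the next cursor position stays ≤ n
      have hq1 : (k + 1) * q = k * q + q := by ring
      have hmul : (k + 1) * q ≤ g * q := mul_le_mul_of_nonneg_right (by omega) hq
      have hcomm : q * g = g * q := mul_comm q g
      have hble : k * q + q + min (k + 1) r ≤ n := by
        have h2 : min (k + 1) r ≤ r := min_le_right _ _
        linarith
      have hstep : k * q + min k r + (q + (if k < r then (1 : Int) else 0))
          = k * q + q + min (k + 1) r := by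
        rcases lt_or_ge k r with h | h
        · rw [if_pos h, min_eq_left (by omega), min_eq_left (by omega)]; ring
        · rw [if_neg (by omega), min_eq_right (by omega), min_eq_right (by omega)]; ring
      rw [PySem.List.pyRange_one_cons hkg]
      by_cases hbr : k * q + min k r < n
      · -- both sides produce group k and continue
        have hlen : 0 < q + (if k < r then (1 : Int) else 0) := by
          rcases lt_or_ge k r with h | h
          · rw [if_pos h]; omega
          · rw [if_neg (by omega)]
            rcases lt_or_ge 0 q with h' | h'
            · omega
            · exfalso
              have hq0 : q = 0 := le_antisymm h' hq
              rw [hq0] at hbr hn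
              rw [min_eq_right (by omega)] at hbr
              simp at hbr hn
              omega
        have he2 : (if r - k > 0 then k * q + min k r + q + 1 else k * q + min k r + q)
            = k * q + q + min (k + 1) r := by
          rcases lt_or_ge k r with h | h
          · rw [if_pos (by omega)]
            rw [if_pos h] at hstep; linarith
          · rw [if_neg (by omega)]
            rw [if_neg (by omega)] at hstep; linarith
        simp only [get_device_map_loop, hne, if_pos hbr, he2,
          min_eq_left hble, PySem.List.enumerate_cons]
        simp only [get_device_map_alt_go, if_neg (by omega : ¬ (q + (if k < r then (1:Int) else 0) ≤ 0))]
        refine congrArg₂ _ (by rw [hstep]) ?_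
        have hrec := ih (k + 1) (by omega) (by omega)
        rw [show k * q + q + min (k + 1) r = (k + 1) * q + min (k + 1) r from by ring,
        show r - k - 1 = r - (k + 1) from by ring]
        exact hrec
      · -- A's loop stops; B's length is ≤ 0, so it breaks
        have hlen0 : q + (if k < r then (1 : Int) else 0) ≤ 0 := by
          have := hstep
          omega
        simp only [get_device_map_loop, hne, if_neg hbr, PySem.List.enumerate_nil]
        simp only [get_device_map_alt_go, if_pos hlen0]
    · -- k ≥ g: B's range is exhausted and A's cursor is already at n
      have hmul : g * q ≤ k * q := mul_le_mul_of_nonneg_right (by omega) hq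
      have hcomm : q * g = g * q := mul_comm q g
      have hstop : ¬ (k * q + min k r < n) := by
        rw [min_eq_right (by omega)]
        linarith
      rw [PySem.List.pyRange_one_eq_nil (by omega)]
      simp only [get_device_map_loop, hne, if_neg hstop, PySem.List.enumerate_nil,
        get_device_map_alt_go]

-- ===== VERDICT (by name: the statement is the Claim_ definition above) =====
theorem get_device_map_spec : Claim_equal_get_device_map := by
  intro n g _hdom hpre
  unfold Spec_get_device_map get_device_map get_device_map_alt
  simp only [show n - 1 - 0 + 1 = n from by ring]
  rcases (show 0 < g ∨ (g < 0 ∧ n ≤ 0) from hpre) with hg | ⟨hg, hn⟩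
  · have hqr : PySem.Int.floordiv n g * g + PySem.Int.mod n g = n :=
      PySem.Int.floordiv_mul_add_mod n g
    have hr0 : 0 ≤ PySem.Int.mod n g := PySem.Int.mod_nonneg n hg
    have hrg : PySem.Int.mod n g < g := PySem.Int.mod_lt n hg
    rcases le_or_gt 0 (PySem.Int.floordiv n g) with hq0 | hq0
    · have hinv := get_device_map_invariant n g (PySem.Int.floordiv n g)
        (PySem.Int.mod n g) hq0 hrg hqr (n.toNat + g.toNat + 1) 0 le_rfl (by omega)
      simpa [min_eq_left hr0] using hinv
    · -- q < 0 forces n < 0: A's loop never runs, B breaks at i = 0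
      have hneg : n < 0 := by nlinarith
      rw [PySem.List.pyRange_one_cons hg]
      simp only [get_device_map_loop, show n - 1 + 1 = n from by ring,
        if_neg (show ¬ ((0:Int) < n) from by omega), PySem.List.enumerate_nil,
        get_device_map_alt_go]
      rw [if_pos (by split_ifs <;> omega)]
  · rw [PySem.List.pyRange_one_eq_nil (by omega)]
    simp only [get_device_map_loop, show n - 1 + 1 = n from by ring,
      if_neg (show ¬ ((0:Int) < n) from by omega), PySem.List.enumerate_nil,
      get_device_map_alt_go]
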